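-- pv_equiv track=rewrite | github.com/MrBrantCode/unitest_baseline | mut_generate/mist_train_cf/cf_86421/solution.py | count_unique_vowels
-- ===== SOURCE A (Python) =====
-- def count_unique_vowels(sentence):
--     vowels = set(['a', 'e', 'i', 'o', 'u'])
--     consonants = set(['b', 'c', 'd', 'f', 'g', 'h', 'j', 'k', 'l', 'm', 'n', 'p', 'q', 'r', 's', 't', 'v', 'w', 'x', 'y', 'z'])
--     unique_vowels = set()
--     prev_char = ''
--
--     for char in sentence:
--         if char.lower() in vowels and prev_char.lower() in consonants:
--             unique_vowels.add(char.lower())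
--         prev_char = char
--
--     return len(unique_vowels)
-- ===== SOURCE B (Python) =====
-- def count_unique_vowels(sentence):
--     consonants = set('bcdfghjklmnpqrstvwxyz')
--     s = sentence.lower()
--     return sum(1 for v in 'aeiou'
--                if any(c == v and p in consonants for p, c in zip(s, s[1:])))
-- ===== Notes on version B (the rewrite author's own statement) =====
-- stated objective: alternative
-- what changed: Instead of one pass maintaining a mutable prev_char and an accumulator set, B lowers the string once and loops over the five vowels, counting for how many of them a consonant-preceded occurrence exists (an existence scan per vowel); no set of found vowels is built.
import Mathlib
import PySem

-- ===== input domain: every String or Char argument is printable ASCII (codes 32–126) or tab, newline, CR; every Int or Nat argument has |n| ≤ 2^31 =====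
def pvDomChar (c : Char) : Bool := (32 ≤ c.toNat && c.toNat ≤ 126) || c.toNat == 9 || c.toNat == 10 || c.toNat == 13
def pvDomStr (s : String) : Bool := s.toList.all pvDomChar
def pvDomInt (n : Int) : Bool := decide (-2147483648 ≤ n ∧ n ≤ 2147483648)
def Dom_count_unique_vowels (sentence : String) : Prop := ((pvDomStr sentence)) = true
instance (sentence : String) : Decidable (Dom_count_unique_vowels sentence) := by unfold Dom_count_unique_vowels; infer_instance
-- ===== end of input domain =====

-- B drops A's prev_char state and accumulator set: it lowers the string once and counts,
-- over the five vowels, for how many a consonant-preceded occurrence exists (one existence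
-- scan per vowel); same linear cost, a different decomposition.

-- ===== PORT A =====
def cuvVowels : PySem.Set Char := PySem.Set.ofList ['a', 'e', 'i', 'o', 'u']
def cuvCons : PySem.Set Char := PySem.Set.ofList
  ['b','c','d','f','g','h','j','k','l','m','n','p','q','r','s','t','v','w','x','y','z']

-- prev_char starts as '' (no predecessor): modelled as Option Char, none = ''.
def cuvStepA (st : PySem.Set Char × Option Char) (ch : Char) : PySem.Set Char × Option Char :=
  ( if cuvVowels.contains (PySem.Chars.lowerChar ch) &&
       (match st.2 with
        | some p => cuvCons.contains (PySem.Chars.lowerChar p)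
        | none => false)
    then PySem.Set.add st.1 (PySem.Chars.lowerChar ch) else st.1,
    some ch)

def count_unique_vowels (sentence : String) : Int :=
  (((sentence.toList.foldl cuvStepA (PySem.Set.empty, none)).1.length : Nat) : Int)

-- ===== PORT B =====
-- B: s = sentence.lower(); sum(1 for v in 'aeiou' if any(c == v and p in consonants
-- for p, c in zip(s, s[1:]))).  s[1:] on the list side is `drop 1` (exact for start 1).
def cuvHas (s : List Char) (v : Char) : Bool :=
  (s.zip (s.drop 1)).any (fun pc => pc.2 == v && cuvCons.contains pc.1)

def count_unique_vowels_alt (sentence : String) : Int :=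
  let s := PySem.Chars.lower sentence.toList
  ((((['a','e','i','o','u'].filter (cuvHas s)).length : Nat)) : Int)

-- ===== PRECONDITION & SPEC =====
def Spec_count_unique_vowels (sentence : String) (out : Int) : Prop := out = count_unique_vowels_alt sentence
instance (sentence : String) (out : Int) : Decidable (Spec_count_unique_vowels sentence out) := by unfold Spec_count_unique_vowels; infer_instance

-- ===== CLAIM =====
def Claim_equal_count_unique_vowels : Prop := ∀ (sentence : String), Dom_count_unique_vowels sentence → Spec_count_unique_vowels sentence (count_unique_vowels sentence)

-- ===== LEMMAS AND PROOFS =====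

-- the list of lowered vowels A adds, walking l with predecessor p
def cuvPick (pc : Char × Char) : Option Char :=
  if cuvVowels.contains (PySem.Chars.lowerChar pc.2) &&
     cuvCons.contains (PySem.Chars.lowerChar pc.1)
  then some (PySem.Chars.lowerChar pc.2) else none

def cuvPicks : Char → List Char → List Char
  | _, [] => []
  | p, c :: cs =>
    match cuvPick (p, c) with
    | some v => v :: cuvPicks c cs
    | none => cuvPicks c cs

theorem cuv_foldA (l : List Char) : ∀ (p : Char) (s : PySem.Set Char),
    (l.foldl cuvStepA (s, some p)).1 = (cuvPicks p l).foldl PySem.Set.add s := by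
  induction l with
  | nil => intro p s; rfl
  | cons c cs ih =>
    intro p s
    simp only [List.foldl, cuvStepA, cuvPicks, cuvPick]
    by_cases h : PySem.Chars.lowerChar c ∈ cuvVowels ∧ PySem.Chars.lowerChar p ∈ cuvCons
    · simp [h.1, h.2, ih]
    · simp only [PySem.Set.contains]
      rcases not_and_or.mp h with h1 | h1 <;> simp [h1, ih]

theorem cuv_zip (l : List Char) : ∀ (p : Char),
    ((p :: l).zip l).filterMap cuvPick = cuvPicks p l := by
  induction l with
  | nil => intro p; rfl
  | cons c cs ih =>
    intro p
    simp only [List.zip_cons_cons, List.filterMap_cons, cuvPicks]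
    cases h : cuvPick (p, c) <;> simp <;> exact ih c

theorem cuv_contains_iff (s : PySem.Set Char) (x : Char) : s.contains x = true ↔ x ∈ s := by
  simp [PySem.Set.contains]

-- membership in A's picked list, for a vowel v, equals B's existence test on the lowered list
theorem cuv_mem_iff_has (l : List Char) (v : Char) (hv : v ∈ cuvVowels) :
    (v ∈ (l.zip (l.drop 1)).filterMap cuvPick) ↔ cuvHas (PySem.Chars.lower l) v = true := by
  have hmap : (PySem.Chars.lower l).zip ((PySem.Chars.lower l).drop 1)
      = (l.zip (l.drop 1)).map (Prod.map PySem.Chars.lowerChar PySem.Chars.lowerChar) := by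
    simp only [PySem.Chars.lower, List.drop_one]
    rw [← List.map_tail, List.zip_map]
  constructor
  · intro h
    rcases List.mem_filterMap.mp h with ⟨pc, hmem, hpick⟩
    unfold cuvPick at hpick
    split at hpick
    · rename_i hcond
      simp only [Bool.and_eq_true] at hcond
      injection hpick with he
      unfold cuvHas
      rw [hmap]
      refine List.any_eq_true.mpr ⟨Prod.map PySem.Chars.lowerChar PySem.Chars.lowerChar pc,
        List.mem_map_of_mem hmem, ?_⟩
      simp only [Prod.map, he, beq_self_eq_true, Bool.true_and]
      exact hcond.2
    · exact absurd hpick (by simp)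
  · intro h
    unfold cuvHas at h
    rw [hmap] at h
    rcases List.any_eq_true.mp h with ⟨q, hq, hcond⟩
    rcases List.mem_map.mp hq with ⟨pc, hmem, rfl⟩
    simp only [Prod.map, Bool.and_eq_true, beq_iff_eq] at hcond
    refine List.mem_filterMap.mpr ⟨pc, hmem, ?_⟩
    unfold cuvPick
    have hvc : cuvVowels.contains (PySem.Chars.lowerChar pc.2) = true := by
      rw [hcond.1]; exact (cuv_contains_iff _ _).mpr hv
    simp only [hcond.1]
    simp
    exact ⟨hv, (cuv_contains_iff _ _).mp hcond.2⟩

-- every pick is a vowel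
theorem cuv_pick_vowel (l : List Char) (v : Char)
    (h : v ∈ (l.zip (l.drop 1)).filterMap cuvPick) : v ∈ cuvVowels := by
  rcases List.mem_filterMap.mp h with ⟨pc, _, hpick⟩
  unfold cuvPick at hpick
  split at hpick
  · rename_i hcond
    simp only [Bool.and_eq_true] at hcond
    injection hpick with he
    exact he ▸ (cuv_contains_iff _ _).mp hcond.1
  · exact absurd hpick (by simp)

theorem cuv_count (l : List Char) :
    (PySem.Set.ofList ((l.zip (l.drop 1)).filterMap cuvPick)).length
      = (['a','e','i','o','u'].filter (cuvHas (PySem.Chars.lower l))).length := by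
  have hn1 : (PySem.Set.ofList ((l.zip (l.drop 1)).filterMap cuvPick)).Nodup :=
    PySem.Set.nodup_ofList _
  have hn2 : (['a','e','i','o','u'].filter (cuvHas (PySem.Chars.lower l))).Nodup :=
    List.Nodup.filter _ (by decide)
  have hperm : (PySem.Set.ofList ((l.zip (l.drop 1)).filterMap cuvPick)).Perm
      (['a','e','i','o','u'].filter (cuvHas (PySem.Chars.lower l))) := by
    refine (List.perm_ext_iff_of_nodup hn1 hn2).mpr (fun x => ?_)
    rw [PySem.Set.mem_ofList, List.mem_filter]
    constructor
    · intro hx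
      have hv : x ∈ cuvVowels := cuv_pick_vowel l x hx
      exact ⟨by simpa [cuvVowels, PySem.Set.ofList] using hv, (cuv_mem_iff_has l x hv).mp hx⟩
    · rintro ⟨hx, hhas⟩
      have hv : x ∈ cuvVowels := by simpa [cuvVowels, PySem.Set.ofList] using hx
      exact (cuv_mem_iff_has l x hv).mpr hhas
  exact hperm.length_eq

-- ===== VERDICT =====
theorem count_unique_vowels_spec : Claim_equal_count_unique_vowels := by
  intro sentence _
  unfold Spec_count_unique_vowels count_unique_vowels count_unique_vowels_alt
  cases h : sentence.toList with
  | nil => rfl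
  | cons p rest =>
    simp only [List.foldl, cuvStepA]
    have hfirst : (if cuvVowels.contains (PySem.Chars.lowerChar p) && false
        then PySem.Set.add PySem.Set.empty (PySem.Chars.lowerChar p) else PySem.Set.empty)
        = PySem.Set.empty := by simp
    rw [hfirst, cuv_foldA rest p]
    have hfold : List.foldl PySem.Set.add PySem.Set.empty (cuvPicks p rest)
        = PySem.Set.ofList (cuvPicks p rest) := rfl
    rw [hfold]
    have hc := cuv_count (p :: rest)
    rw [List.drop_one, List.tail_cons, cuv_zip] at hc
    exact_mod_cast hc
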